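-- pv_equiv track=rewrite | github.com/WC2001/wdi | wdi2/11.py | f
-- ===== SOURCE A (Python) =====
-- def f(x):
--     a = x%10
--     x //= 10
--     while x>0:
--         if x%10 >= a:
--             return False
--         a = x%10
--         x //= 10
--     return True
-- ===== SOURCE B (Python) =====
-- def f(x):
--     ds = [x % 10]
--     x //= 10
--     while x > 0:
--         ds.append(x % 10)
--         x //= 10
--     return all(ds[i] < ds[i - 1] for i in range(1, len(ds)))
-- ===== Notes on version B (the rewrite author's own statement) =====
-- stated objective: alternative
-- what changed: B materializes all digits least-significant-first in one loop and then verifies strict decrease in a separate all(...) pass, instead of A's fused extraction-and-check loop with an early return.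
import Mathlib
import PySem

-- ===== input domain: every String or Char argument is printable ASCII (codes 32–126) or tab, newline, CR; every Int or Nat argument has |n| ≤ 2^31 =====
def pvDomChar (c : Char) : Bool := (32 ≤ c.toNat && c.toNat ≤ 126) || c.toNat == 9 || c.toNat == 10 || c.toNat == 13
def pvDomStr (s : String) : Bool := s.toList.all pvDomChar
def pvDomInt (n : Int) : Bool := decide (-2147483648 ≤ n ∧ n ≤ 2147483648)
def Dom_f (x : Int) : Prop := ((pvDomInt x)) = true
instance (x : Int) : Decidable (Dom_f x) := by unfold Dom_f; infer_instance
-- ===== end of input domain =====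

-- B separates digit extraction (least-significant-first list) from the strict-decrease check,
-- instead of A's fused loop with an early return; same cost, different decomposition.


-- ===== PORT A =====
-- the 'while x>0' loop: state (a, x); early 'return False' when x%10 >= a
def fLoop (a x : Int) : Bool :=
  if 0 < x then
    if a ≤ PySem.Int.mod x 10 then false
    else fLoop (PySem.Int.mod x 10) (PySem.Int.floordiv x 10)
  else true
termination_by x.toNat
decreasing_by
  have h10 : (0:Int) < 10 := by norm_num
  have he : PySem.Int.floordiv x 10 = x / 10 := PySem.Int.floordiv_eq_ediv_of_pos h10
  rw [he]; omega

def f (x : Int) : Bool :=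
  fLoop (PySem.Int.mod x 10) (PySem.Int.floordiv x 10)

-- ===== PORT B =====
-- the 'while x>0' extraction loop of Source B: appended digits, least-significant first
def digitsRev (x : Int) : List Int :=
  if 0 < x then PySem.Int.mod x 10 :: digitsRev (PySem.Int.floordiv x 10) else []
termination_by x.toNat
decreasing_by
  have h10 : (0:Int) < 10 := by norm_num
  have he : PySem.Int.floordiv x 10 = x / 10 := PySem.Int.floordiv_eq_ediv_of_pos h10
  rw [he]; omega

-- all(ds[i] < ds[i-1] for i in range(1, len(ds)))
def chkStrictDec : List Int → Bool
  | a :: b :: t => (decide (b < a)) && chkStrictDec (b :: t)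
  | _ => true

def f_alt (x : Int) : Bool :=
  chkStrictDec (PySem.Int.mod x 10 :: digitsRev (PySem.Int.floordiv x 10))

-- ===== PRECONDITION & SPEC =====
def Spec_f (x : Int) (out : Bool) : Prop := out = f_alt x
instance (x : Int) (out : Bool) : Decidable (Spec_f x out) := by unfold Spec_f; infer_instance

-- ===== CLAIM (what is proved, stated in full; the proofs are below) =====
def Claim_equal_f : Prop := ∀ (x : Int), Dom_f x → Spec_f x (f x)

-- ===== LEMMAS AND PROOFS =====
theorem fLoop_eq_chk (a x : Int) : fLoop a x = chkStrictDec (a :: digitsRev x) := by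
  induction a, x using fLoop.induct with
  | case1 a x hx hge =>
      rw [fLoop, digitsRev, if_pos hx, if_pos hx, if_pos hge, chkStrictDec]
      rw [decide_eq_false (not_lt.mpr hge), Bool.false_and]
  | case2 a x hx hge ih =>
      rw [fLoop, digitsRev, if_pos hx, if_pos hx, if_neg hge, chkStrictDec, ih]
      rw [decide_eq_true (lt_of_not_ge hge), Bool.true_and]
  | case3 a x hx =>
      rw [fLoop, digitsRev, if_neg hx, if_neg hx]
      rfl

-- ===== VERDICT (by name: the statement is the Claim_ definition above) =====
theorem f_spec : Claim_equal_f := by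
  intro x _
  unfold Spec_f f f_alt
  exact fLoop_eq_chk _ _
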